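-- pv_equiv track=rewrite | github.com/DavianYang/nn | nn/data/datasets/coco.py | delete_coco_empty_category
-- ===== SOURCE A (Python) =====
-- MISSING_IDS = [12, 26, 29, 30, 45, 66, 68, 69, 71, 83, 91]
--
-- def delete_coco_empty_category(old_id):
--     start_idx = 1
--     new_id = old_id - start_idx
--     for missing_id in MISSING_IDS:
--         if old_id > missing_id:
--             new_id -= 1
--         elif old_id == missing_id:
--             raise KeyError("illegal category ID in coco dataset! ID # is {}".format(old_id))
--         else:
--             break
--     return new_id
-- ===== SOURCE B (Python) =====
-- MISSING_IDS = [12, 26, 29, 30, 45, 66, 68, 69, 71, 83, 91]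
--
-- def delete_coco_empty_category(old_id):
--     # binary search (bisect_left by hand): lo = number of missing IDs < old_id
--     lo, hi = 0, len(MISSING_IDS)
--     while lo < hi:
--         mid = (lo + hi) // 2
--         if MISSING_IDS[mid] < old_id:
--             lo = mid + 1
--         else:
--             hi = mid
--     if lo < len(MISSING_IDS) and MISSING_IDS[lo] == old_id:
--         raise KeyError("illegal category ID in coco dataset! ID # is {}".format(old_id))
--     return old_id - 1 - lo
-- ===== Notes on version B (the rewrite author's own statement) =====
-- stated objective: alternative
-- what changed: Replaces A's linear short-circuit loop (decrement/raise/break per element) by a hand-written binary search (bisect_left) counting the missing IDs below old_id, plus a separate membership test for the KeyError.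
import Mathlib
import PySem

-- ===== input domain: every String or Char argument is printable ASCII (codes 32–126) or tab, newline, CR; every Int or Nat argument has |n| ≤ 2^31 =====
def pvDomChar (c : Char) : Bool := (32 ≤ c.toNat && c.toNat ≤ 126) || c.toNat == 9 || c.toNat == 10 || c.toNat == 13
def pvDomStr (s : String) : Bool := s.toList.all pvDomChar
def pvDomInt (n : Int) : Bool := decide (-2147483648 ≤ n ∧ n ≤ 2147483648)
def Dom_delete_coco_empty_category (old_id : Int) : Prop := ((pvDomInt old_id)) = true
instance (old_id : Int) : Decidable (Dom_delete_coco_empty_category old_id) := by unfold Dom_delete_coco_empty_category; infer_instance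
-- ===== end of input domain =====

-- B replaces A's linear short-circuit loop by a binary search (bisect_left) over the sorted MISSING_IDS.
-- ===== PORT A =====
def pyMISSING : List Int := [12, 26, 29, 30, 45, 66, 68, 69, 71, 83, 91]

-- A's for-loop with break/raise; `none` marks the KeyError raise (excluded by Pre_)
def aLoop : List Int → Int → Int → Option Int
  | [], _, new_id => some new_id
  | m :: rest, old_id, new_id =>
    if old_id > m then aLoop rest old_id (new_id - 1)
    else if old_id == m then none
    else some new_id

def delete_coco_empty_category (old_id : Int) : Int :=
  (aLoop pyMISSING old_id (old_id - 1)).getD 0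

-- ===== PORT B =====
-- Source B's while-loop binary search (bisect_left)
def bsGo (xs : List Int) (x : Int) (lo hi : Nat) : Nat :=
  if h : lo < hi then
    let mid := (lo + hi) / 2
    if xs.getD mid 0 < x then bsGo xs x (mid + 1) hi else bsGo xs x lo mid
  else lo
termination_by hi - lo
decreasing_by all_goals omega

def delete_coco_empty_category_alt (old_id : Int) : Int :=
  let lo := bsGo pyMISSING old_id 0 pyMISSING.length
  if lo < pyMISSING.length ∧ pyMISSING.getD lo 0 == old_id then 0  -- KeyError raise (excluded by Pre_)
  else old_id - 1 - (lo : Int)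

-- ===== PRECONDITION & SPEC =====
-- Pre_ excludes exactly the missing category IDs, on which Python A (and B) raise KeyError.
def Pre_delete_coco_empty_category (old_id : Int) : Prop := old_id ∉ pyMISSING
instance (old_id : Int) : Decidable (Pre_delete_coco_empty_category old_id) := by unfold Pre_delete_coco_empty_category; infer_instance
def pvWitness_delete_coco_empty_category : Int := 5
def Spec_delete_coco_empty_category (old_id : Int) (out : Int) : Prop := out = delete_coco_empty_category_alt old_id
instance (old_id : Int) (out : Int) : Decidable (Spec_delete_coco_empty_category old_id out) := by unfold Spec_delete_coco_empty_category; infer_instance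

-- ===== CLAIM (what is proved, stated in full; the proofs are below) =====
def Claim_equal_delete_coco_empty_category : Prop := ∀ (old_id : Int), Dom_delete_coco_empty_category old_id → Pre_delete_coco_empty_category old_id → Spec_delete_coco_empty_category old_id (delete_coco_empty_category old_id)

-- ===== LEMMAS AND PROOFS =====
-- one-step unfoldings of bsGo at each (lo, hi) pair its recursion on pyMISSING reaches
lemma bs_0_11 (x : Int) : bsGo [12, 26, 29, 30, 45, 66, 68, 69, 71, 83, 91] x 0 11 = if (66:Int) < x then bsGo [12, 26, 29, 30, 45, 66, 68, 69, 71, 83, 91] x 6 11 else bsGo [12, 26, 29, 30, 45, 66, 68, 69, 71, 83, 91] x 0 5 := by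
  rw [bsGo]; norm_num

lemma bs_6_11 (x : Int) : bsGo [12, 26, 29, 30, 45, 66, 68, 69, 71, 83, 91] x 6 11 = if (71:Int) < x then bsGo [12, 26, 29, 30, 45, 66, 68, 69, 71, 83, 91] x 9 11 else bsGo [12, 26, 29, 30, 45, 66, 68, 69, 71, 83, 91] x 6 8 := by
  rw [bsGo]; norm_num

lemma bs_9_11 (x : Int) : bsGo [12, 26, 29, 30, 45, 66, 68, 69, 71, 83, 91] x 9 11 = if (91:Int) < x then bsGo [12, 26, 29, 30, 45, 66, 68, 69, 71, 83, 91] x 11 11 else bsGo [12, 26, 29, 30, 45, 66, 68, 69, 71, 83, 91] x 9 10 := by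
  rw [bsGo]; norm_num

lemma bs_9_10 (x : Int) : bsGo [12, 26, 29, 30, 45, 66, 68, 69, 71, 83, 91] x 9 10 = if (83:Int) < x then bsGo [12, 26, 29, 30, 45, 66, 68, 69, 71, 83, 91] x 10 10 else bsGo [12, 26, 29, 30, 45, 66, 68, 69, 71, 83, 91] x 9 9 := by
  rw [bsGo]; norm_num

lemma bs_6_8 (x : Int) : bsGo [12, 26, 29, 30, 45, 66, 68, 69, 71, 83, 91] x 6 8 = if (69:Int) < x then bsGo [12, 26, 29, 30, 45, 66, 68, 69, 71, 83, 91] x 8 8 else bsGo [12, 26, 29, 30, 45, 66, 68, 69, 71, 83, 91] x 6 7 := by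
  rw [bsGo]; norm_num

lemma bs_6_7 (x : Int) : bsGo [12, 26, 29, 30, 45, 66, 68, 69, 71, 83, 91] x 6 7 = if (68:Int) < x then bsGo [12, 26, 29, 30, 45, 66, 68, 69, 71, 83, 91] x 7 7 else bsGo [12, 26, 29, 30, 45, 66, 68, 69, 71, 83, 91] x 6 6 := by
  rw [bsGo]; norm_num

lemma bs_0_5 (x : Int) : bsGo [12, 26, 29, 30, 45, 66, 68, 69, 71, 83, 91] x 0 5 = if (29:Int) < x then bsGo [12, 26, 29, 30, 45, 66, 68, 69, 71, 83, 91] x 3 5 else bsGo [12, 26, 29, 30, 45, 66, 68, 69, 71, 83, 91] x 0 2 := by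
  rw [bsGo]; norm_num

lemma bs_3_5 (x : Int) : bsGo [12, 26, 29, 30, 45, 66, 68, 69, 71, 83, 91] x 3 5 = if (45:Int) < x then bsGo [12, 26, 29, 30, 45, 66, 68, 69, 71, 83, 91] x 5 5 else bsGo [12, 26, 29, 30, 45, 66, 68, 69, 71, 83, 91] x 3 4 := by
  rw [bsGo]; norm_num

lemma bs_3_4 (x : Int) : bsGo [12, 26, 29, 30, 45, 66, 68, 69, 71, 83, 91] x 3 4 = if (30:Int) < x then bsGo [12, 26, 29, 30, 45, 66, 68, 69, 71, 83, 91] x 4 4 else bsGo [12, 26, 29, 30, 45, 66, 68, 69, 71, 83, 91] x 3 3 := by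
  rw [bsGo]; norm_num

lemma bs_0_2 (x : Int) : bsGo [12, 26, 29, 30, 45, 66, 68, 69, 71, 83, 91] x 0 2 = if (26:Int) < x then bsGo [12, 26, 29, 30, 45, 66, 68, 69, 71, 83, 91] x 2 2 else bsGo [12, 26, 29, 30, 45, 66, 68, 69, 71, 83, 91] x 0 1 := by
  rw [bsGo]; norm_num

lemma bs_0_1 (x : Int) : bsGo [12, 26, 29, 30, 45, 66, 68, 69, 71, 83, 91] x 0 1 = if (12:Int) < x then bsGo [12, 26, 29, 30, 45, 66, 68, 69, 71, 83, 91] x 1 1 else bsGo [12, 26, 29, 30, 45, 66, 68, 69, 71, 83, 91] x 0 0 := by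
  rw [bsGo]; norm_num

lemma bs_0_0 (x : Int) : bsGo [12, 26, 29, 30, 45, 66, 68, 69, 71, 83, 91] x 0 0 = 0 := by
  rw [bsGo]; norm_num

lemma bs_1_1 (x : Int) : bsGo [12, 26, 29, 30, 45, 66, 68, 69, 71, 83, 91] x 1 1 = 1 := by
  rw [bsGo]; norm_num

lemma bs_2_2 (x : Int) : bsGo [12, 26, 29, 30, 45, 66, 68, 69, 71, 83, 91] x 2 2 = 2 := by
  rw [bsGo]; norm_num

lemma bs_3_3 (x : Int) : bsGo [12, 26, 29, 30, 45, 66, 68, 69, 71, 83, 91] x 3 3 = 3 := by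
  rw [bsGo]; norm_num

lemma bs_4_4 (x : Int) : bsGo [12, 26, 29, 30, 45, 66, 68, 69, 71, 83, 91] x 4 4 = 4 := by
  rw [bsGo]; norm_num

lemma bs_5_5 (x : Int) : bsGo [12, 26, 29, 30, 45, 66, 68, 69, 71, 83, 91] x 5 5 = 5 := by
  rw [bsGo]; norm_num

lemma bs_6_6 (x : Int) : bsGo [12, 26, 29, 30, 45, 66, 68, 69, 71, 83, 91] x 6 6 = 6 := by
  rw [bsGo]; norm_num

lemma bs_7_7 (x : Int) : bsGo [12, 26, 29, 30, 45, 66, 68, 69, 71, 83, 91] x 7 7 = 7 := by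
  rw [bsGo]; norm_num

lemma bs_8_8 (x : Int) : bsGo [12, 26, 29, 30, 45, 66, 68, 69, 71, 83, 91] x 8 8 = 8 := by
  rw [bsGo]; norm_num

lemma bs_9_9 (x : Int) : bsGo [12, 26, 29, 30, 45, 66, 68, 69, 71, 83, 91] x 9 9 = 9 := by
  rw [bsGo]; norm_num

lemma bs_10_10 (x : Int) : bsGo [12, 26, 29, 30, 45, 66, 68, 69, 71, 83, 91] x 10 10 = 10 := by
  rw [bsGo]; norm_num

lemma bs_11_11 (x : Int) : bsGo [12, 26, 29, 30, 45, 66, 68, 69, 71, 83, 91] x 11 11 = 11 := by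
  rw [bsGo]; norm_num

-- ===== VERDICT (by name: the statement is the Claim_ definition above) =====
set_option maxHeartbeats 1000000 in
theorem delete_coco_empty_category_spec : Claim_equal_delete_coco_empty_category := by
  intro old_id _ hpre
  unfold Spec_delete_coco_empty_category
  simp only [Pre_delete_coco_empty_category, pyMISSING, List.mem_cons, List.not_mem_nil,
    or_false, not_or] at hpre
  obtain ⟨h12, h26, h29, h30, h45, h66, h68, h69, h71, h83, h91⟩ := hpre
  simp only [delete_coco_empty_category, delete_coco_empty_category_alt, pyMISSING,
    List.length_cons, List.length_nil, Nat.reduceAdd]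
  by_cases P12 : (12:Int) < old_id
  · by_cases P26 : (26:Int) < old_id
    · by_cases P29 : (29:Int) < old_id
      · by_cases P30 : (30:Int) < old_id
        · by_cases P45 : (45:Int) < old_id
          · by_cases P66 : (66:Int) < old_id
            · by_cases P68 : (68:Int) < old_id
              · by_cases P69 : (69:Int) < old_id
                · by_cases P71 : (71:Int) < old_id
                  · by_cases P83 : (83:Int) < old_id
                    · by_cases P91 : (91:Int) < old_id
                      · simp [aLoop, bs_0_11, bs_6_11, bs_9_11, bs_9_10, bs_6_8, bs_6_7, bs_0_5, bs_3_5, bs_3_4, bs_0_2, bs_0_1, bs_0_0, bs_1_1, bs_2_2, bs_3_3, bs_4_4, bs_5_5, bs_6_6, bs_7_7, bs_8_8, bs_9_9, bs_10_10, bs_11_11, beq_iff_eq, h12, h26, h29, h30, h45, h66, h68, h69, h71, h83, h91, P12, P26, P29, P30, P45, P66, P68, P69, P71, P83, P91]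
                        omega
                      · simp [aLoop, bs_0_11, bs_6_11, bs_9_11, bs_9_10, bs_6_8, bs_6_7, bs_0_5, bs_3_5, bs_3_4, bs_0_2, bs_0_1, bs_0_0, bs_1_1, bs_2_2, bs_3_3, bs_4_4, bs_5_5, bs_6_6, bs_7_7, bs_8_8, bs_9_9, bs_10_10, bs_11_11, beq_iff_eq, h12, h26, h29, h30, h45, h66, h68, h69, h71, h83, h91, P12, P26, P29, P30, P45, P66, P68, P69, P71, P83, P91]
                        omega
                    · have N91 : ¬ (91:Int) < old_id := by omega
                      simp [aLoop, bs_0_11, bs_6_11, bs_9_11, bs_9_10, bs_6_8, bs_6_7, bs_0_5, bs_3_5, bs_3_4, bs_0_2, bs_0_1, bs_0_0, bs_1_1, bs_2_2, bs_3_3, bs_4_4, bs_5_5, bs_6_6, bs_7_7, bs_8_8, bs_9_9, bs_10_10, bs_11_11, beq_iff_eq, h12, h26, h29, h30, h45, h66, h68, h69, h71, h83, h91, P12, P26, P29, P30, P45, P66, P68, P69, P71, P83, N91]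
                      omega
                  · have N83 : ¬ (83:Int) < old_id := by omega
                    have N91 : ¬ (91:Int) < old_id := by omega
                    simp [aLoop, bs_0_11, bs_6_11, bs_9_11, bs_9_10, bs_6_8, bs_6_7, bs_0_5, bs_3_5, bs_3_4, bs_0_2, bs_0_1, bs_0_0, bs_1_1, bs_2_2, bs_3_3, bs_4_4, bs_5_5, bs_6_6, bs_7_7, bs_8_8, bs_9_9, bs_10_10, bs_11_11, beq_iff_eq, h12, h26, h29, h30, h45, h66, h68, h69, h71, h83, h91, P12, P26, P29, P30, P45, P66, P68, P69, P71, N83, N91]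
                    omega
                · have N71 : ¬ (71:Int) < old_id := by omega
                  have N83 : ¬ (83:Int) < old_id := by omega
                  have N91 : ¬ (91:Int) < old_id := by omega
                  simp [aLoop, bs_0_11, bs_6_11, bs_9_11, bs_9_10, bs_6_8, bs_6_7, bs_0_5, bs_3_5, bs_3_4, bs_0_2, bs_0_1, bs_0_0, bs_1_1, bs_2_2, bs_3_3, bs_4_4, bs_5_5, bs_6_6, bs_7_7, bs_8_8, bs_9_9, bs_10_10, bs_11_11, beq_iff_eq, h12, h26, h29, h30, h45, h66, h68, h69, h71, h83, h91, P12, P26, P29, P30, P45, P66, P68, P69, N71, N83, N91]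
                  omega
              · have N69 : ¬ (69:Int) < old_id := by omega
                have N71 : ¬ (71:Int) < old_id := by omega
                have N83 : ¬ (83:Int) < old_id := by omega
                have N91 : ¬ (91:Int) < old_id := by omega
                simp [aLoop, bs_0_11, bs_6_11, bs_9_11, bs_9_10, bs_6_8, bs_6_7, bs_0_5, bs_3_5, bs_3_4, bs_0_2, bs_0_1, bs_0_0, bs_1_1, bs_2_2, bs_3_3, bs_4_4, bs_5_5, bs_6_6, bs_7_7, bs_8_8, bs_9_9, bs_10_10, bs_11_11, beq_iff_eq, h12, h26, h29, h30, h45, h66, h68, h69, h71, h83, h91, P12, P26, P29, P30, P45, P66, P68, N69, N71, N83, N91]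
                omega
            · have N68 : ¬ (68:Int) < old_id := by omega
              have N69 : ¬ (69:Int) < old_id := by omega
              have N71 : ¬ (71:Int) < old_id := by omega
              have N83 : ¬ (83:Int) < old_id := by omega
              have N91 : ¬ (91:Int) < old_id := by omega
              simp [aLoop, bs_0_11, bs_6_11, bs_9_11, bs_9_10, bs_6_8, bs_6_7, bs_0_5, bs_3_5, bs_3_4, bs_0_2, bs_0_1, bs_0_0, bs_1_1, bs_2_2, bs_3_3, bs_4_4, bs_5_5, bs_6_6, bs_7_7, bs_8_8, bs_9_9, bs_10_10, bs_11_11, beq_iff_eq, h12, h26, h29, h30, h45, h66, h68, h69, h71, h83, h91, P12, P26, P29, P30, P45, P66, N68, N69, N71, N83, N91]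
              omega
          · have N66 : ¬ (66:Int) < old_id := by omega
            have N68 : ¬ (68:Int) < old_id := by omega
            have N69 : ¬ (69:Int) < old_id := by omega
            have N71 : ¬ (71:Int) < old_id := by omega
            have N83 : ¬ (83:Int) < old_id := by omega
            have N91 : ¬ (91:Int) < old_id := by omega
            simp [aLoop, bs_0_11, bs_6_11, bs_9_11, bs_9_10, bs_6_8, bs_6_7, bs_0_5, bs_3_5, bs_3_4, bs_0_2, bs_0_1, bs_0_0, bs_1_1, bs_2_2, bs_3_3, bs_4_4, bs_5_5, bs_6_6, bs_7_7, bs_8_8, bs_9_9, bs_10_10, bs_11_11, beq_iff_eq, h12, h26, h29, h30, h45, h66, h68, h69, h71, h83, h91, P12, P26, P29, P30, P45, N66, N68, N69, N71, N83, N91]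
            omega
        · have N45 : ¬ (45:Int) < old_id := by omega
          have N66 : ¬ (66:Int) < old_id := by omega
          have N68 : ¬ (68:Int) < old_id := by omega
          have N69 : ¬ (69:Int) < old_id := by omega
          have N71 : ¬ (71:Int) < old_id := by omega
          have N83 : ¬ (83:Int) < old_id := by omega
          have N91 : ¬ (91:Int) < old_id := by omega
          simp [aLoop, bs_0_11, bs_6_11, bs_9_11, bs_9_10, bs_6_8, bs_6_7, bs_0_5, bs_3_5, bs_3_4, bs_0_2, bs_0_1, bs_0_0, bs_1_1, bs_2_2, bs_3_3, bs_4_4, bs_5_5, bs_6_6, bs_7_7, bs_8_8, bs_9_9, bs_10_10, bs_11_11, beq_iff_eq, h12, h26, h29, h30, h45, h66, h68, h69, h71, h83, h91, P12, P26, P29, P30, N45, N66, N68, N69, N71, N83, N91]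
          omega
      · have N30 : ¬ (30:Int) < old_id := by omega
        have N45 : ¬ (45:Int) < old_id := by omega
        have N66 : ¬ (66:Int) < old_id := by omega
        have N68 : ¬ (68:Int) < old_id := by omega
        have N69 : ¬ (69:Int) < old_id := by omega
        have N71 : ¬ (71:Int) < old_id := by omega
        have N83 : ¬ (83:Int) < old_id := by omega
        have N91 : ¬ (91:Int) < old_id := by omega
        simp [aLoop, bs_0_11, bs_6_11, bs_9_11, bs_9_10, bs_6_8, bs_6_7, bs_0_5, bs_3_5, bs_3_4, bs_0_2, bs_0_1, bs_0_0, bs_1_1, bs_2_2, bs_3_3, bs_4_4, bs_5_5, bs_6_6, bs_7_7, bs_8_8, bs_9_9, bs_10_10, bs_11_11, beq_iff_eq, h12, h26, h29, h30, h45, h66, h68, h69, h71, h83, h91, P12, P26, P29, N30, N45, N66, N68, N69, N71, N83, N91]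
        omega
    · have N29 : ¬ (29:Int) < old_id := by omega
      have N30 : ¬ (30:Int) < old_id := by omega
      have N45 : ¬ (45:Int) < old_id := by omega
      have N66 : ¬ (66:Int) < old_id := by omega
      have N68 : ¬ (68:Int) < old_id := by omega
      have N69 : ¬ (69:Int) < old_id := by omega
      have N71 : ¬ (71:Int) < old_id := by omega
      have N83 : ¬ (83:Int) < old_id := by omega
      have N91 : ¬ (91:Int) < old_id := by omega
      simp [aLoop, bs_0_11, bs_6_11, bs_9_11, bs_9_10, bs_6_8, bs_6_7, bs_0_5, bs_3_5, bs_3_4, bs_0_2, bs_0_1, bs_0_0, bs_1_1, bs_2_2, bs_3_3, bs_4_4, bs_5_5, bs_6_6, bs_7_7, bs_8_8, bs_9_9, bs_10_10, bs_11_11, beq_iff_eq, h12, h26, h29, h30, h45, h66, h68, h69, h71, h83, h91, P12, P26, N29, N30, N45, N66, N68, N69, N71, N83, N91]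
      omega
  · have N26 : ¬ (26:Int) < old_id := by omega
    have N29 : ¬ (29:Int) < old_id := by omega
    have N30 : ¬ (30:Int) < old_id := by omega
    have N45 : ¬ (45:Int) < old_id := by omega
    have N66 : ¬ (66:Int) < old_id := by omega
    have N68 : ¬ (68:Int) < old_id := by omega
    have N69 : ¬ (69:Int) < old_id := by omega
    have N71 : ¬ (71:Int) < old_id := by omega
    have N83 : ¬ (83:Int) < old_id := by omega
    have N91 : ¬ (91:Int) < old_id := by omega
    simp [aLoop, bs_0_11, bs_6_11, bs_9_11, bs_9_10, bs_6_8, bs_6_7, bs_0_5, bs_3_5, bs_3_4, bs_0_2, bs_0_1, bs_0_0, bs_1_1, bs_2_2, bs_3_3, bs_4_4, bs_5_5, bs_6_6, bs_7_7, bs_8_8, bs_9_9, bs_10_10, bs_11_11, beq_iff_eq, h12, h26, h29, h30, h45, h66, h68, h69, h71, h83, h91, P12, N26, N29, N30, N45, N66, N68, N69, N71, N83, N91]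
    omega
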